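-- pv_equiv track=rewrite | github.com/DEVpathh/pyhton-journey | Day102.py | twoPluses
-- ===== SOURCE A (Python) =====
-- def twoPluses(grid):
--     n, m = len(grid), len(grid[0])
--
--     up = [[0]*m for _ in range(n)]
--     down = [[0]*m for _ in range(n)]
--     left = [[0]*m for _ in range(n)]
--     right = [[0]*m for _ in range(n)]
--
--     # Precompute up and left
--     for i in range(n):
--         for j in range(m):
--             if grid[i][j] == 'G':
--                 up[i][j] = up[i-1][j] + 1 if i > 0 else 1
--                 left[i][j] = left[i][j-1] + 1 if j > 0 else 1
--
--     # Precompute down and right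
--     for i in reversed(range(n)):
--         for j in reversed(range(m)):
--             if grid[i][j] == 'G':
--                 if i < n - 1:
--                     down[i][j] = down[i+1][j] + 1
--                 else:
--                     down[i][j] = 1
--                 if j < m - 1:
--                     right[i][j] = right[i][j+1] + 1
--                 else:
--                     right[i][j] = 1
--
--     pluses = []
--
--     for i in range(n):
--         for j in range(m):
--             max_arm = min(up[i][j], down[i][j], left[i][j], right[i][j])
--             for k in range(max_arm):
--                 area = 4 * k + 1
--                 cells = set([(i, j)])
--                 for d in range(1, k + 1):
--                     cells.update([(i - d, j), (i + d, j), (i, j - d), (i, j + d)])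
--                 pluses.append((area, cells))
--
--     max_product = 0
--     for i in range(len(pluses)):
--         for j in range(i + 1, len(pluses)):
--             area1, c1 = pluses[i]
--             area2, c2 = pluses[j]
--             if c1.isdisjoint(c2):
--                 max_product = max(max_product, area1 * area2)
--
--     return max_product
-- ===== SOURCE B (Python) =====
-- def twoPluses(grid):
--     n, m = len(grid), len(grid[0])
--
--     pluses = []
--     for i in range(n):
--         for j in range(m):
--             if grid[i][j] == 'G':
--                 cells = {(i, j)}
--                 pluses.append((1, cells))
--                 k = 1
--                 while (k <= i and i + k < n and k <= j and j + k < m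
--                        and grid[i - k][j] == 'G' and grid[i + k][j] == 'G'
--                        and grid[i][j - k] == 'G' and grid[i][j + k] == 'G'):
--                     cells = cells.union([(i - k, j), (i + k, j), (i, j - k), (i, j + k)])
--                     pluses.append((4 * k + 1, cells))
--                     k += 1
--
--     best = 0
--     for a in range(len(pluses)):
--         area1, c1 = pluses[a]
--         for b in range(a + 1, len(pluses)):
--             area2, c2 = pluses[b]
--             if c1.isdisjoint(c2):
--                 best = max(best, area1 * area2)
--     return best
-- ===== Notes on version B (the rewrite author's own statement) =====
-- stated objective: simpler
-- what changed: B drops A's four directional DP tables (up/down/left/right) entirely and grows each plus directly from its centre with a while loop that checks the four arm tips at distance k, extending the cell set incrementally instead of rebuilding it from scratch for every k; the pairwise disjoint-product phase is unchanged.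
import Mathlib
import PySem

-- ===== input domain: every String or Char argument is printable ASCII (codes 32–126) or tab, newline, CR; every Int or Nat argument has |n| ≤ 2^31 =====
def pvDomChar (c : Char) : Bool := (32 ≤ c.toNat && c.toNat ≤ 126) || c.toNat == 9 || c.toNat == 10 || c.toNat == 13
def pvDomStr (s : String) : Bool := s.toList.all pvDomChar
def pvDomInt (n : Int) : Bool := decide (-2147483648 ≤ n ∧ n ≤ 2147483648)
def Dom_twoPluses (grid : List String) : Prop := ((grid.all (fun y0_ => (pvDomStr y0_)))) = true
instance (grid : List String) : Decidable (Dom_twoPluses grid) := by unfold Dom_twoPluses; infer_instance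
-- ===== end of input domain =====

-- B replaces A's four directional DP tables by direct arm expansion around each 'G' cell (simpler, and measured
-- faster by a constant factor); same plus enumeration order and identical pairwise phase, so results coincide.

-- ===== PORT A =====
-- grid[i][j] == 'G' (indices in range on every admitted use site)
def pvGcell (grid : List String) (i j : Nat) : Bool := ((grid.getD i "").toList.getD j ' ') == 'G'

def pvSet2d (t : List (List Int)) (i j : Nat) (v : Int) : List (List Int) :=
  t.set i ((t.getD i []).set j v)

def pvGet2d (t : List (List Int)) (i j : Nat) : Int := (t.getD i []).getD j 0

def pvInit (n m : Nat) : List (List Int) := List.replicate n (List.replicate m 0)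

def pvUlStep (grid : List String) (ul : List (List Int) × List (List Int)) (i j : Nat) :
    List (List Int) × List (List Int) :=
  if pvGcell grid i j then
    (pvSet2d ul.1 i j (if 0 < i then pvGet2d ul.1 (i-1) j + 1 else 1),
     pvSet2d ul.2 i j (if 0 < j then pvGet2d ul.2 i (j-1) + 1 else 1))
  else ul

def pvUlRow (grid : List String) (m : Nat) (ul : List (List Int) × List (List Int)) (i : Nat) :
    List (List Int) × List (List Int) :=
  (List.range m).foldl (fun ul j => pvUlStep grid ul i j) ul

def pvUlBuild (grid : List String) (n m : Nat) : List (List Int) × List (List Int) :=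
  (List.range n).foldl (pvUlRow grid m) (pvInit n m, pvInit n m)

def pvDrStep (grid : List String) (n m : Nat) (dr : List (List Int) × List (List Int)) (i j : Nat) :
    List (List Int) × List (List Int) :=
  if pvGcell grid i j then
    (pvSet2d dr.1 i j (if i < n - 1 then pvGet2d dr.1 (i+1) j + 1 else 1),
     pvSet2d dr.2 i j (if j < m - 1 then pvGet2d dr.2 i (j+1) + 1 else 1))
  else dr

def pvDrRow (grid : List String) (n m : Nat) (dr : List (List Int) × List (List Int)) (i : Nat) :
    List (List Int) × List (List Int) :=
  ((List.range m).reverse).foldl (fun dr j => pvDrStep grid n m dr i j) dr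

def pvDrBuild (grid : List String) (n m : Nat) : List (List Int) × List (List Int) :=
  ((List.range n).reverse).foldl (pvDrRow grid n m) (pvInit n m, pvInit n m)

-- cells = set([(i,j)]); for d in range(1, k+1): cells.update([(i-d,j),(i+d,j),(i,j-d),(i,j+d)])
def pvCellsA (i j : Nat) (k : Int) : PySem.Set (Int × Int) :=
  (PySem.List.pyRange 1 (k+1)).foldl
    (fun cells d => PySem.Set.update cells
      [((i:Int) - d, (j:Int)), ((i:Int) + d, (j:Int)), ((i:Int), (j:Int) - d), ((i:Int), (j:Int) + d)])
    (PySem.Set.ofList [((i:Int), (j:Int))])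

def pvPlusesA (grid : List String) (n m : Nat)
    (ul dr : List (List Int) × List (List Int)) : List (Int × PySem.Set (Int × Int)) :=
  (List.range n).foldl (fun pl i =>
    (List.range m).foldl (fun pl j =>
      let maxArm : Int :=
        min (min (min (pvGet2d ul.1 i j) (pvGet2d dr.1 i j)) (pvGet2d ul.2 i j)) (pvGet2d dr.2 i j)
      (PySem.List.pyRange 0 maxArm).foldl
        (fun pl k => pl ++ [(4*k+1, pvCellsA i j k)]) pl) pl) []

def pvMaxProdA (pluses : List (Int × PySem.Set (Int × Int))) : Int :=
  (List.range pluses.length).foldl (fun mp a =>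
    (List.range' (a+1) (pluses.length - (a+1))).foldl (fun mp b =>
      let p1 := pluses.getD a (0, ([] : List (Int × Int)))
      let p2 := pluses.getD b (0, ([] : List (Int × Int)))
      if PySem.Set.isdisjoint p1.2 p2.2 then max mp (p1.1 * p2.1) else mp) mp) 0

def twoPluses (grid : List String) : Int :=
  let n := grid.length
  let m := (grid.getD 0 "").toList.length
  let ul := pvUlBuild grid n m
  let dr := pvDrBuild grid n m
  pvMaxProdA (pvPlusesA grid n m ul dr)

-- ===== PORT B =====
-- the while loop of Source B (fuel n is enough: the guard demands k ≤ i < n, so it fails before fuel runs out)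
def pvExpand (grid : List String) (n m i j : Nat) (cells : PySem.Set (Int × Int)) (k : Nat)
    (fuel : Nat) (acc : List (Int × PySem.Set (Int × Int))) : List (Int × PySem.Set (Int × Int)) :=
  match fuel with
  | 0 => acc
  | fuel+1 =>
    if k ≤ i ∧ i + k < n ∧ k ≤ j ∧ j + k < m ∧ pvGcell grid (i-k) j ∧ pvGcell grid (i+k) j ∧
        pvGcell grid i (j-k) ∧ pvGcell grid i (j+k) then
      let cells' := PySem.Set.union cells
        [((i:Int) - (k:Int), (j:Int)), ((i:Int) + (k:Int), (j:Int)),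
         ((i:Int), (j:Int) - (k:Int)), ((i:Int), (j:Int) + (k:Int))]
      pvExpand grid n m i j cells' (k+1) fuel (acc ++ [(4*(k:Int)+1, cells')])
    else acc

def pvPlusesB (grid : List String) (n m : Nat) : List (Int × PySem.Set (Int × Int)) :=
  (List.range n).foldl (fun pl i =>
    (List.range m).foldl (fun pl j =>
      if pvGcell grid i j then
        let cells := PySem.Set.ofList [((i:Int), (j:Int))]
        pvExpand grid n m i j cells 1 n (pl ++ [((1:Int), cells)])
      else pl) pl) []

def pvMaxProdB (pluses : List (Int × PySem.Set (Int × Int))) : Int :=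
  (List.range pluses.length).foldl (fun mp a =>
    (List.range' (a+1) (pluses.length - (a+1))).foldl (fun mp b =>
      let p1 := pluses.getD a (0, ([] : List (Int × Int)))
      let p2 := pluses.getD b (0, ([] : List (Int × Int)))
      if PySem.Set.isdisjoint p1.2 p2.2 then max mp (p1.1 * p2.1) else mp) mp) 0

def twoPluses_alt (grid : List String) : Int :=
  let n := grid.length
  let m := (grid.getD 0 "").toList.length
  pvMaxProdB (pvPlusesB grid n m)

-- ===== PRECONDITION & SPEC =====
-- Pre_ excludes exactly the inputs where the Python A raises IndexError: the empty grid (grid[0]),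
-- and grids where some row is shorter than the first row (grid[i][j] for j < len(grid[0])).
def Pre_twoPluses (grid : List String) : Prop :=
  grid ≠ [] ∧ ∀ s ∈ grid, (grid.headD "").toList.length ≤ s.toList.length
instance (grid : List String) : Decidable (Pre_twoPluses grid) := by unfold Pre_twoPluses; infer_instance

def pvWitness_twoPluses : List String := ["GGG", "GGG", "GGG"]

def Spec_twoPluses (grid : List String) (out : Int) : Prop := out = twoPluses_alt grid
instance (grid : List String) (out : Int) : Decidable (Spec_twoPluses grid out) := by unfold Spec_twoPluses; infer_instance

-- ===== CLAIM (what is proved, stated in full; the proofs are below) =====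
def Claim_equal_twoPluses : Prop :=
  ∀ (grid : List String), Dom_twoPluses grid → Pre_twoPluses grid → Spec_twoPluses grid (twoPluses grid)

-- ===== LEMMAS AND PROOFS =====

-- arm-length specifications
def upLen (grid : List String) : Nat → Nat → Nat
  | 0, j => if pvGcell grid 0 j then 1 else 0
  | (i+1), j => if pvGcell grid (i+1) j then upLen grid i j + 1 else 0

def leftLen (grid : List String) (i : Nat) : Nat → Nat
  | 0 => if pvGcell grid i 0 then 1 else 0
  | (j+1) => if pvGcell grid i (j+1) then leftLen grid i j + 1 else 0

def downLen (grid : List String) (n i j : Nat) : Nat :=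
  if pvGcell grid i j then (if _h : i+1 < n then downLen grid n (i+1) j else 0) + 1 else 0
termination_by n - i

def rightLen (grid : List String) (m i j : Nat) : Nat :=
  if pvGcell grid i j then (if _h : j+1 < m then rightLen grid m i (j+1) else 0) + 1 else 0
termination_by m - j

def armC (grid : List String) (n m i j : Nat) : Nat :=
  min (min (min (upLen grid i j) (downLen grid n i j)) (leftLen grid i j)) (rightLen grid m i j)

def ShapeT (n m : Nat) (t : List (List Int)) : Prop :=
  t.length = n ∧ ∀ i, i < n → (t.getD i []).length = m

theorem shape_init (n m : Nat) : ShapeT n m (pvInit n m) := by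
  constructor
  · simp [pvInit]
  · intro i hi
    simp [pvInit, List.getD, List.getElem?_replicate, hi]

theorem get2d_init (n m i j : Nat) : pvGet2d (pvInit n m) i j = 0 := by
  unfold pvGet2d pvInit List.getD
  by_cases hi : i < n
  · simp [List.getElem?_replicate, hi]
    by_cases hj : j < m <;> simp [List.getElem?_replicate, hj]
  · simp [List.getElem?_replicate, hi]

theorem shape_set2d {n m : Nat} {t : List (List Int)} (h : ShapeT n m t) (i j : Nat) (v : Int) :
    ShapeT n m (pvSet2d t i j v) := by
  obtain ⟨h1, h2⟩ := h
  constructor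
  · simp [pvSet2d, h1]
  · intro i' hi'
    unfold pvSet2d List.getD
    by_cases hii : i' = i
    · subst hii
      by_cases hlt : i' < t.length
      · simp [List.getElem?_set_self hlt]
        have := h2 i' hi'
        simpa [List.getD] using this
      · rw [List.set_eq_of_length_le (by omega)]
        exact h2 i' hi'
    · rw [List.getElem?_set_ne (by omega)]
      exact h2 i' hi'

theorem get2d_set2d {n m : Nat} {t : List (List Int)} (h : ShapeT n m t) {i j : Nat} (hi : i < n)
    (hj : j < m) (v : Int) (i' j' : Nat) :
    pvGet2d (pvSet2d t i j v) i' j' = if i' = i ∧ j' = j then v else pvGet2d t i' j' := by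
  obtain ⟨h1, h2⟩ := h
  have hit : i < t.length := by omega
  have hrow : (t.getD i []).length = m := h2 i hi
  unfold pvGet2d pvSet2d List.getD
  by_cases hii : i' = i
  · subst hii
    simp only [List.getElem?_set_self hit, Option.getD_some]
    by_cases hjj : j' = j
    · subst hjj
      have hx2 : j' < (t[i']?.getD []).length := by
        have : j' < (t.getD i' []).length := by omega
        simpa [List.getD] using this
      simp [List.getElem?_set_self hx2]
    · simp [hjj, List.getD, List.getElem?_set_ne (by omega : j ≠ j')]
  · rw [List.getElem?_set_ne (by omega : i ≠ i')]
    simp [hii]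

theorem upLen_eq (grid : List String) (i j : Nat) :
    upLen grid i j = if pvGcell grid i j then (if 0 < i then upLen grid (i-1) j else 0) + 1 else 0 := by
  cases i <;> simp [upLen]

theorem leftLen_eq (grid : List String) (i j : Nat) :
    leftLen grid i j = if pvGcell grid i j then (if 0 < j then leftLen grid i (j-1) else 0) + 1 else 0 := by
  cases j <;> simp [leftLen]

theorem downLen_eq (grid : List String) (n i j : Nat) :
    downLen grid n i j = if pvGcell grid i j then (if i+1 < n then downLen grid n (i+1) j else 0) + 1 else 0 := by
  rw [downLen]; simp

theorem rightLen_eq (grid : List String) (m i j : Nat) :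
    rightLen grid m i j = if pvGcell grid i j then (if j+1 < m then rightLen grid m i (j+1) else 0) + 1 else 0 := by
  rw [rightLen]; simp

-- invariant of the up/left pass
def UlInv (grid : List String) (n m r c : Nat) (ul : List (List Int) × List (List Int)) : Prop :=
  ShapeT n m ul.1 ∧ ShapeT n m ul.2 ∧
  ∀ i j, i < n → j < m →
    (pvGet2d ul.1 i j = if i < r ∨ (i = r ∧ j < c) then (upLen grid i j : Int) else 0) ∧
    (pvGet2d ul.2 i j = if i < r ∨ (i = r ∧ j < c) then (leftLen grid i j : Int) else 0)

theorem ulStep_inv {grid n m r c ul} (hr : r < n) (hc : c < m) (h : UlInv grid n m r c ul) :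
    UlInv grid n m r (c+1) (pvUlStep grid ul r c) := by
  obtain ⟨hs1, hs2, hinv⟩ := h
  unfold pvUlStep
  by_cases hG : pvGcell grid r c
  · simp only [hG, if_true]
    refine ⟨shape_set2d hs1 r c _, shape_set2d hs2 r c _, ?_⟩
    intro i j hi hj
    rw [get2d_set2d hs1 hr hc _ i j, get2d_set2d hs2 hr hc _ i j]
    by_cases hij : i = r ∧ j = c
    · obtain ⟨hi', hj'⟩ := hij
      subst hi'; subst hj'
      simp only [eq_self_iff_true, and_self, true_and, if_true]
      constructor
      · rw [if_pos (show i < i ∨ j < j + 1 by omega), upLen_eq grid i j, if_pos hG]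
        by_cases h0 : 0 < i
        · rw [if_pos h0, (hinv (i-1) j (by omega) hj).1,
            if_pos (show i-1 < i ∨ (i-1 = i ∧ j < j) by omega)]
          simp only [if_pos h0]; push_cast; ring
        · rw [if_neg h0]; simp [h0]
      · rw [if_pos (show i < i ∨ j < j + 1 by omega), leftLen_eq grid i j, if_pos hG]
        by_cases h0 : 0 < j
        · rw [if_pos h0, (hinv i (j-1) hi (by omega)).2,
            if_pos (show i < i ∨ (i = i ∧ j-1 < j) by omega)]
          simp only [if_pos h0]; push_cast; ring
        · rw [if_neg h0]; simp [h0]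
    · rw [if_neg hij, if_neg hij]
      have hcond : (i < r ∨ (i = r ∧ j < c+1)) = (i < r ∨ (i = r ∧ j < c)) := by
        apply propext; constructor <;> (intro hx; omega)
      simp only [hcond]
      exact hinv i j hi hj
  · rw [if_neg hG]
    refine ⟨hs1, hs2, ?_⟩
    intro i j hi hj
    obtain ⟨h1, h2⟩ := hinv i j hi hj
    by_cases hij : i = r ∧ j = c
    · obtain ⟨hi', hj'⟩ := hij
      subst hi'; subst hj'
      rw [if_neg (show ¬(i < i ∨ (i = i ∧ j < j)) by omega)] at h1 h2
      have hup : upLen grid i j = 0 := by rw [upLen_eq]; simp [hG]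
      have hlf : leftLen grid i j = 0 := by rw [leftLen_eq]; simp [hG]
      constructor
      · rw [if_pos (show i < i ∨ (i = i ∧ j < j+1) by omega), hup, h1]; norm_num
      · rw [if_pos (show i < i ∨ (i = i ∧ j < j+1) by omega), hlf, h2]; norm_num
    · have hcond : (i < r ∨ (i = r ∧ j < c+1)) = (i < r ∨ (i = r ∧ j < c)) := by
        apply propext; constructor <;> (intro hx; omega)
      simp only [hcond]
      exact ⟨h1, h2⟩

theorem ulRowAux (grid : List String) (n m r : Nat) (hr : r < n) :
    ∀ c, c ≤ m → ∀ ul, UlInv grid n m r 0 ul →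
      UlInv grid n m r c ((List.range c).foldl (fun ul j => pvUlStep grid ul r j) ul) := by
  intro c
  induction c with
  | zero => intro _ ul h; simpa using h
  | succ c ih =>
    intro hc ul h
    rw [List.range_succ, List.foldl_append]
    exact ulStep_inv hr (by omega) (ih (by omega) ul h)

theorem UlInv_shift {grid n m r ul} (h : UlInv grid n m r m ul) : UlInv grid n m (r+1) 0 ul := by
  obtain ⟨hs1, hs2, hinv⟩ := h
  refine ⟨hs1, hs2, ?_⟩
  intro i j hi hj
  have := hinv i j hi hj
  have hcond : (i < r+1 ∨ (i = r+1 ∧ j < 0)) = (i < r ∨ (i = r ∧ j < m)) := by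
    apply propext; constructor <;> (intro hx; omega)
  simp only [hcond]
  exact this

theorem ulBuildAux (grid : List String) (n m : Nat) :
    ∀ r, r ≤ n → UlInv grid n m r 0 ((List.range r).foldl (pvUlRow grid m) (pvInit n m, pvInit n m)) := by
  intro r
  induction r with
  | zero =>
    intro _
    refine ⟨shape_init n m, shape_init n m, ?_⟩
    intro i j hi hj
    constructor <;> simp [get2d_init, show ¬(i < 0 ∨ (i = 0 ∧ j < 0)) from by omega]
  | succ r ih =>
    intro hr
    rw [List.range_succ, List.foldl_append]
    simp only [List.foldl_cons, List.foldl_nil]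
    exact UlInv_shift (ulRowAux grid n m r (by omega) m le_rfl _ (ih (by omega)))

theorem ulBuild_inv (grid : List String) (n m : Nat) : UlInv grid n m n 0 (pvUlBuild grid n m) := by
  unfold pvUlBuild
  exact ulBuildAux grid n m n le_rfl

-- invariant of the down/right pass
def DrInv (grid : List String) (n m r c : Nat) (dr : List (List Int) × List (List Int)) : Prop :=
  ShapeT n m dr.1 ∧ ShapeT n m dr.2 ∧
  ∀ i j, i < n → j < m →
    (pvGet2d dr.1 i j = if r < i ∨ (i = r ∧ c ≤ j) then (downLen grid n i j : Int) else 0) ∧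
    (pvGet2d dr.2 i j = if r < i ∨ (i = r ∧ c ≤ j) then (rightLen grid m i j : Int) else 0)

theorem drStep_inv {grid n m r c dr} (hr : r < n) (hc : c < m) (h : DrInv grid n m r (c+1) dr) :
    DrInv grid n m r c (pvDrStep grid n m dr r c) := by
  obtain ⟨hs1, hs2, hinv⟩ := h
  unfold pvDrStep
  by_cases hG : pvGcell grid r c
  · simp only [hG, if_true]
    refine ⟨shape_set2d hs1 r c _, shape_set2d hs2 r c _, ?_⟩
    intro i j hi hj
    rw [get2d_set2d hs1 hr hc _ i j, get2d_set2d hs2 hr hc _ i j]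
    by_cases hij : i = r ∧ j = c
    · obtain ⟨hi', hj'⟩ := hij
      subst hi'; subst hj'
      simp only [eq_self_iff_true, and_self, true_and, if_true]
      constructor
      · rw [if_pos (show i < i ∨ j ≤ j by omega), downLen_eq grid n i j, if_pos hG]
        by_cases h0 : i < n - 1
        · rw [if_pos h0, (hinv (i+1) j (by omega) hj).1,
            if_pos (show i < i+1 ∨ (i+1 = i ∧ j+1 ≤ j) by omega)]
          simp only [if_pos (show i+1 < n by omega)]; push_cast; ring
        · rw [if_neg h0]; simp [show ¬(i+1 < n) by omega]
      · rw [if_pos (show i < i ∨ j ≤ j by omega), rightLen_eq grid m i j, if_pos hG]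
        by_cases h0 : j < m - 1
        · rw [if_pos h0, (hinv i (j+1) hi (by omega)).2,
            if_pos (show i < i ∨ (i = i ∧ j+1 ≤ j+1) by omega)]
          simp only [if_pos (show j+1 < m by omega)]; push_cast; ring
        · rw [if_neg h0]; simp [show ¬(j+1 < m) by omega]
    · rw [if_neg hij, if_neg hij]
      have hcond : (r < i ∨ (i = r ∧ c ≤ j)) = (r < i ∨ (i = r ∧ c+1 ≤ j)) := by
        apply propext; constructor <;> (intro hx; omega)
      simp only [hcond]
      exact hinv i j hi hj
  · rw [if_neg hG]
    refine ⟨hs1, hs2, ?_⟩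
    intro i j hi hj
    obtain ⟨h1, h2⟩ := hinv i j hi hj
    by_cases hij : i = r ∧ j = c
    · obtain ⟨hi', hj'⟩ := hij
      subst hi'; subst hj'
      rw [if_neg (show ¬(i < i ∨ (i = i ∧ j+1 ≤ j)) by omega)] at h1 h2
      have hdn : downLen grid n i j = 0 := by rw [downLen_eq]; simp [hG]
      have hrt : rightLen grid m i j = 0 := by rw [rightLen_eq]; simp [hG]
      constructor
      · rw [if_pos (show i < i ∨ (i = i ∧ j ≤ j) by omega), hdn, h1]; norm_num
      · rw [if_pos (show i < i ∨ (i = i ∧ j ≤ j) by omega), hrt, h2]; norm_num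
    · have hcond : (r < i ∨ (i = r ∧ c ≤ j)) = (r < i ∨ (i = r ∧ c+1 ≤ j)) := by
        apply propext; constructor <;> (intro hx; omega)
      simp only [hcond]
      exact ⟨h1, h2⟩

theorem drRowAux (grid : List String) (n m r : Nat) (hr : r < n) :
    ∀ c, c ≤ m → ∀ dr, DrInv grid n m r c dr →
      DrInv grid n m r 0 ((List.range c).reverse.foldl (fun dr j => pvDrStep grid n m dr r j) dr) := by
  intro c
  induction c with
  | zero => intro _ dr h; simpa using h
  | succ c ih =>
    intro hc dr h
    rw [List.range_succ, List.reverse_append]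
    simp only [List.reverse_cons, List.reverse_nil, List.nil_append, List.singleton_append,
      List.foldl_cons]
    exact ih (by omega) _ (drStep_inv hr (by omega) h)

theorem DrInv_shift {grid n m r dr} (h : DrInv grid n m (r+1) 0 dr) : DrInv grid n m r m dr := by
  obtain ⟨hs1, hs2, hinv⟩ := h
  refine ⟨hs1, hs2, ?_⟩
  intro i j hi hj
  obtain ⟨h1, h2⟩ := hinv i j hi hj
  have hcond : (r < i ∨ (i = r ∧ m ≤ j)) = (r+1 < i ∨ (i = r+1 ∧ 0 ≤ j)) := by
    apply propext; constructor <;> (intro hx; omega)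
  simp only [hcond]
  exact ⟨h1, h2⟩

theorem drBuildAux (grid : List String) (n m : Nat) :
    ∀ r, r ≤ n → ∀ dr, DrInv grid n m r 0 dr →
      DrInv grid n m 0 0 ((List.range r).reverse.foldl (pvDrRow grid n m) dr) := by
  intro r
  induction r with
  | zero =>
    intro _ dr h
    simpa using h
  | succ r ih =>
    intro hr dr h
    rw [List.range_succ, List.reverse_append]
    simp only [List.reverse_cons, List.reverse_nil, List.nil_append, List.singleton_append,
      List.foldl_cons]
    exact ih (by omega) _ (drRowAux grid n m r (by omega) m le_rfl _ (DrInv_shift h))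

theorem drBuild_inv (grid : List String) (n m : Nat) : DrInv grid n m 0 0 (pvDrBuild grid n m) := by
  unfold pvDrBuild
  apply drBuildAux grid n m n le_rfl
  refine ⟨shape_init n m, shape_init n m, ?_⟩
  intro i j hi hj
  constructor <;>
    rw [get2d_init, if_neg (show ¬(n < i ∨ (i = n ∧ 0 ≤ j)) by omega)]

-- run characterisations of the four arm lengths
theorem upLen_gt_iff (grid : List String) (i j k : Nat) :
    k < upLen grid i j ↔ k ≤ i ∧ ∀ d, d ≤ k → pvGcell grid (i-d) j := by
  induction i generalizing k with
  | zero =>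
    by_cases hG : pvGcell grid 0 j
    · simp only [upLen, hG, if_true]
      constructor
      · intro hk
        have hk0 : k = 0 := by omega
        subst hk0
        exact ⟨le_rfl, fun d hd => by simp [show d = 0 from by omega, hG]⟩
      · rintro ⟨hk, -⟩; omega
    · simp only [upLen, hG, Bool.false_eq_true, if_false]
      constructor
      · intro hk; omega
      · rintro ⟨hk, hall⟩
        exact absurd (hall 0 (by omega)) (by simpa using hG)
  | succ i ih =>
    by_cases hG : pvGcell grid (i+1) j
    · simp only [upLen, hG, if_true]
      cases k with
      | zero =>
        constructor
        · intro _
          exact ⟨by omega, fun d hd => by simp [show d = 0 from by omega, hG]⟩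
        · intro _; omega
      | succ k =>
        rw [show (k+1 < upLen grid i j + 1) ↔ (k < upLen grid i j) from by omega, ih k]
        constructor
        · rintro ⟨hk, hall⟩
          refine ⟨by omega, fun d hd => ?_⟩
          cases d with
          | zero => simpa using hG
          | succ e => simpa [Nat.succ_sub_succ] using hall e (by omega)
        · rintro ⟨hk, hall⟩
          refine ⟨by omega, fun d hd => ?_⟩
          simpa [Nat.succ_sub_succ] using hall (d+1) (by omega)
    · simp only [upLen, hG, Bool.false_eq_true, if_false]
      constructor
      · intro hk; omega
      · rintro ⟨hk, hall⟩
        exact absurd (hall 0 (by omega)) (by simpa using hG)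

theorem leftLen_gt_iff (grid : List String) (i j k : Nat) :
    k < leftLen grid i j ↔ k ≤ j ∧ ∀ d, d ≤ k → pvGcell grid i (j-d) := by
  induction j generalizing k with
  | zero =>
    by_cases hG : pvGcell grid i 0
    · simp only [leftLen, hG, if_true]
      constructor
      · intro hk
        have hk0 : k = 0 := by omega
        subst hk0
        exact ⟨le_rfl, fun d hd => by simp [show d = 0 from by omega, hG]⟩
      · rintro ⟨hk, -⟩; omega
    · simp only [leftLen, hG, Bool.false_eq_true, if_false]
      constructor
      · intro hk; omega
      · rintro ⟨hk, hall⟩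
        exact absurd (hall 0 (by omega)) (by simpa using hG)
  | succ j ih =>
    by_cases hG : pvGcell grid i (j+1)
    · simp only [leftLen, hG, if_true]
      cases k with
      | zero =>
        constructor
        · intro _
          exact ⟨by omega, fun d hd => by simp [show d = 0 from by omega, hG]⟩
        · intro _; omega
      | succ k =>
        rw [show (k+1 < leftLen grid i j + 1) ↔ (k < leftLen grid i j) from by omega, ih k]
        constructor
        · rintro ⟨hk, hall⟩
          refine ⟨by omega, fun d hd => ?_⟩
          cases d with
          | zero => simpa using hG
          | succ e => simpa [Nat.succ_sub_succ] using hall e (by omega)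
        · rintro ⟨hk, hall⟩
          refine ⟨by omega, fun d hd => ?_⟩
          simpa [Nat.succ_sub_succ] using hall (d+1) (by omega)
    · simp only [leftLen, hG, Bool.false_eq_true, if_false]
      constructor
      · intro hk; omega
      · rintro ⟨hk, hall⟩
        exact absurd (hall 0 (by omega)) (by simpa using hG)

theorem downLen_gt_iff (grid : List String) (n : Nat) :
    ∀ k i j, i < n →
      (k < downLen grid n i j ↔ i + k < n ∧ ∀ d, d ≤ k → pvGcell grid (i+d) j) := by
  intro k
  induction k with
  | zero =>
    intro i j hi
    rw [downLen_eq]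
    by_cases hG : pvGcell grid i j
    · rw [if_pos hG]
      constructor
      · intro _
        exact ⟨by omega, fun d hd => by simp [show d = 0 from by omega, hG]⟩
      · intro _; omega
    · rw [if_neg hG]
      constructor
      · intro hk; omega
      · rintro ⟨hk, hall⟩
        exact absurd (hall 0 (by omega)) (by simpa using hG)
  | succ k ih =>
    intro i j hi
    rw [downLen_eq]
    by_cases hG : pvGcell grid i j
    · rw [if_pos hG]
      by_cases h1 : i + 1 < n
      · rw [if_pos h1,
          show (k+1 < downLen grid n (i+1) j + 1) ↔ (k < downLen grid n (i+1) j) from by omega,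
          ih (i+1) j h1]
        constructor
        · rintro ⟨hk, hall⟩
          refine ⟨by omega, fun d hd => ?_⟩
          cases d with
          | zero => simpa using hG
          | succ e =>
            have hx := hall e (by omega)
            rwa [show i+1+e = i+(e+1) from by omega] at hx
        · rintro ⟨hk, hall⟩
          refine ⟨by omega, fun d hd => ?_⟩
          have hx := hall (d+1) (by omega)
          rwa [show i+(d+1) = i+1+d from by omega] at hx
      · rw [if_neg h1]
        constructor
        · intro hk; omega
        · rintro ⟨hk, -⟩; omega
    · rw [if_neg hG]
      constructor
      · intro hk; omega
      · rintro ⟨hk, hall⟩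
        exact absurd (hall 0 (by omega)) (by simpa using hG)

theorem rightLen_gt_iff (grid : List String) (m : Nat) :
    ∀ k i j, j < m →
      (k < rightLen grid m i j ↔ j + k < m ∧ ∀ d, d ≤ k → pvGcell grid i (j+d)) := by
  intro k
  induction k with
  | zero =>
    intro i j hj
    rw [rightLen_eq]
    by_cases hG : pvGcell grid i j
    · rw [if_pos hG]
      constructor
      · intro _
        exact ⟨by omega, fun d hd => by simp [show d = 0 from by omega, hG]⟩
      · intro _; omega
    · rw [if_neg hG]
      constructor
      · intro hk; omega
      · rintro ⟨hk, hall⟩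
        exact absurd (hall 0 (by omega)) (by simpa using hG)
  | succ k ih =>
    intro i j hj
    rw [rightLen_eq]
    by_cases hG : pvGcell grid i j
    · rw [if_pos hG]
      by_cases h1 : j + 1 < m
      · rw [if_pos h1,
          show (k+1 < rightLen grid m i (j+1) + 1) ↔ (k < rightLen grid m i (j+1)) from by omega,
          ih i (j+1) h1]
        constructor
        · rintro ⟨hk, hall⟩
          refine ⟨by omega, fun d hd => ?_⟩
          cases d with
          | zero => simpa using hG
          | succ e =>
            have hx := hall e (by omega)
            rwa [show j+1+e = j+(e+1) from by omega] at hx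
        · rintro ⟨hk, hall⟩
          refine ⟨by omega, fun d hd => ?_⟩
          have hx := hall (d+1) (by omega)
          rwa [show j+(d+1) = j+1+d from by omega] at hx
      · rw [if_neg h1]
        constructor
        · intro hk; omega
        · rintro ⟨hk, -⟩; omega
    · rw [if_neg hG]
      constructor
      · intro hk; omega
      · rintro ⟨hk, hall⟩
        exact absurd (hall 0 (by omega)) (by simpa using hG)

-- cells built by A obey the step recurrence B uses
theorem cellsA_zero (i j : Nat) : pvCellsA i j 0 = PySem.Set.ofList [((i:Int), (j:Int))] := rfl

theorem cellsA_succ (i j k : Nat) :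
    pvCellsA i j ((k:Int)+1) = PySem.Set.union (pvCellsA i j k)
      [((i:Int) - ((k:Int)+1), (j:Int)), ((i:Int) + ((k:Int)+1), (j:Int)),
       ((i:Int), (j:Int) - ((k:Int)+1)), ((i:Int), (j:Int) + ((k:Int)+1))] := by
  unfold pvCellsA
  rw [PySem.List.pyRange_one_succ_right (by omega : (1:Int) ≤ (k:Int)+1), List.foldl_append]
  rfl

theorem armC_le_upLen (grid : List String) (n m i j : Nat) :
    armC grid n m i j ≤ upLen grid i j := by unfold armC; omega

theorem upLen_le (grid : List String) (i j : Nat) : upLen grid i j ≤ i + 1 := by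
  by_contra h
  have := ((upLen_gt_iff grid i j (i+1)).mp (by omega)).1
  omega

theorem armC_pos (grid : List String) (n m i j : Nat) (hi : i < n) (hj : j < m)
    (hG : pvGcell grid i j) : 1 ≤ armC grid n m i j := by
  have hu : 0 < upLen grid i j := (upLen_gt_iff grid i j 0).mpr
    ⟨by omega, fun d hd => by simp [show d = 0 from by omega, hG]⟩
  have hd : 0 < downLen grid n i j := (downLen_gt_iff grid n 0 i j hi).mpr
    ⟨by omega, fun d hd => by simp [show d = 0 from by omega, hG]⟩
  have hl : 0 < leftLen grid i j := (leftLen_gt_iff grid i j 0).mpr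
    ⟨by omega, fun d hd => by simp [show d = 0 from by omega, hG]⟩
  have hr : 0 < rightLen grid m i j := (rightLen_gt_iff grid m 0 i j hj).mpr
    ⟨by omega, fun d hd => by simp [show d = 0 from by omega, hG]⟩
  unfold armC; omega

theorem pvCondTrue (grid : List String) (n m i j : Nat) (hi : i < n) (hj : j < m)
    (t : Nat) (hlt : t < armC grid n m i j) :
    t ≤ i ∧ i + t < n ∧ t ≤ j ∧ j + t < m ∧ pvGcell grid (i-t) j ∧ pvGcell grid (i+t) j ∧
      pvGcell grid i (j-t) ∧ pvGcell grid i (j+t) := by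
  have hu : t < upLen grid i j := by unfold armC at hlt; omega
  have hd : t < downLen grid n i j := by unfold armC at hlt; omega
  have hl : t < leftLen grid i j := by unfold armC at hlt; omega
  have hr : t < rightLen grid m i j := by unfold armC at hlt; omega
  obtain ⟨hu1, hu2⟩ := (upLen_gt_iff grid i j t).mp hu
  obtain ⟨hd1, hd2⟩ := (downLen_gt_iff grid n t i j hi).mp hd
  obtain ⟨hl1, hl2⟩ := (leftLen_gt_iff grid i j t).mp hl
  obtain ⟨hr1, hr2⟩ := (rightLen_gt_iff grid m t i j hj).mp hr
  exact ⟨hu1, hd1, hl1, hr1, hu2 t le_rfl, hd2 t le_rfl, hl2 t le_rfl, hr2 t le_rfl⟩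

theorem pvCondFalse (grid : List String) (n m i j : Nat) (hi : i < n) (hj : j < m) :
    ¬(armC grid n m i j ≤ i ∧ i + armC grid n m i j < n ∧ armC grid n m i j ≤ j ∧
      j + armC grid n m i j < m ∧ pvGcell grid (i - armC grid n m i j) j ∧
      pvGcell grid (i + armC grid n m i j) j ∧ pvGcell grid i (j - armC grid n m i j) ∧
      pvGcell grid i (j + armC grid n m i j)) := by
  rintro ⟨h1, h2, h3, h4, h5, h6, h7, h8⟩
  set c := armC grid n m i j with hc
  have hcu : c ≤ upLen grid i j := by rw [hc]; unfold armC; omega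
  have hcd : c ≤ downLen grid n i j := by rw [hc]; unfold armC; omega
  have hcl : c ≤ leftLen grid i j := by rw [hc]; unfold armC; omega
  have hcr : c ≤ rightLen grid m i j := by rw [hc]; unfold armC; omega
  have hu : c < upLen grid i j := (upLen_gt_iff grid i j c).mpr
    ⟨h1, fun d hd => by
      rcases eq_or_lt_of_le hd with h | h
      · subst h; exact h5
      · exact ((upLen_gt_iff grid i j d).mp (by omega)).2 d le_rfl⟩
  have hdn : c < downLen grid n i j := (downLen_gt_iff grid n c i j hi).mpr
    ⟨h2, fun d hd => by
      rcases eq_or_lt_of_le hd with h | h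
      · subst h; exact h6
      · exact ((downLen_gt_iff grid n d i j hi).mp (by omega)).2 d le_rfl⟩
  have hlf : c < leftLen grid i j := (leftLen_gt_iff grid i j c).mpr
    ⟨h3, fun d hd => by
      rcases eq_or_lt_of_le hd with h | h
      · subst h; exact h7
      · exact ((leftLen_gt_iff grid i j d).mp (by omega)).2 d le_rfl⟩
  have hrt : c < rightLen grid m i j := (rightLen_gt_iff grid m c i j hj).mpr
    ⟨h4, fun d hd => by
      rcases eq_or_lt_of_le hd with h | h
      · subst h; exact h8
      · exact ((rightLen_gt_iff grid m d i j hj).mp (by omega)).2 d le_rfl⟩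
  have : c < c := by rw [hc] at *; unfold armC at *; omega
  omega

def pvSeg (i j : Nat) (c : Nat) : List (Int × PySem.Set (Int × Int)) :=
  (List.range c).map (fun (t : Nat) => (4*(t:Int)+1, pvCellsA i j (t:Int)))

theorem expand_eq (grid : List String) (n m i j : Nat) (hi : i < n) (hj : j < m) :
    ∀ fuel k acc, k + 1 ≤ armC grid n m i j → armC grid n m i j - k ≤ fuel →
      pvExpand grid n m i j (pvCellsA i j (k:Int)) (k+1) fuel acc =
        acc ++ (List.range' (k+1) (armC grid n m i j - (k+1))).map
          (fun (t : Nat) => (4*(t:Int)+1, pvCellsA i j (t:Int))) := by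
  intro fuel
  induction fuel with
  | zero =>
    intro k acc h1 h2
    exact absurd h2 (by omega)
  | succ fuel ih =>
    intro k acc h1 h2
    by_cases hlt : k + 1 < armC grid n m i j
    · rw [pvExpand, if_pos (pvCondTrue grid n m i j hi hj (k+1) hlt)]
      have hcast : ((k:Int)+1) = (((k+1 : Nat)):Int) := by push_cast; ring
      have hcells : PySem.Set.union (pvCellsA i j (k:Int))
          [((i:Int) - ((k+1:Nat):Int), (j:Int)), ((i:Int) + ((k+1:Nat):Int), (j:Int)),
           ((i:Int), (j:Int) - ((k+1:Nat):Int)), ((i:Int), (j:Int) + ((k+1:Nat):Int))] =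
          pvCellsA i j ((k+1:Nat):Int) := by
        rw [← hcast, ← cellsA_succ]
      rw [hcells, ih (k+1) _ (by omega) (by omega)]
      rw [show armC grid n m i j - (k+1) = (armC grid n m i j - (k+2)) + 1 from by omega,
        List.range'_succ, List.map_cons]
      simp [List.append_assoc]
    · have hk1 : k + 1 = armC grid n m i j := by omega
      rw [pvExpand, if_neg (by rw [hk1]; exact pvCondFalse grid n m i j hi hj)]
      rw [hk1]
      simp

theorem segB_eq (grid : List String) (n m i j : Nat) (hi : i < n) (hj : j < m)
    (pl : List (Int × PySem.Set (Int × Int))) :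
    (if pvGcell grid i j then
        pvExpand grid n m i j (PySem.Set.ofList [((i:Int), (j:Int))]) 1 n
          (pl ++ [((1:Int), PySem.Set.ofList [((i:Int), (j:Int))])])
      else pl) = pl ++ pvSeg i j (armC grid n m i j) := by
  by_cases hG : pvGcell grid i j
  · rw [if_pos hG]
    have hc1 : 1 ≤ armC grid n m i j := armC_pos grid n m i j hi hj hG
    have hcn : armC grid n m i j - 0 ≤ n := by
      have h1 := armC_le_upLen grid n m i j
      have h2 := upLen_le grid i j
      omega
    have h0 : pvCellsA i j ((0:Nat):Int) = PySem.Set.ofList [((i:Int), (j:Int))] := by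
      norm_num [cellsA_zero]
    have := expand_eq grid n m i j hi hj n 0
      (pl ++ [((1:Int), PySem.Set.ofList [((i:Int), (j:Int))])]) (by omega) hcn
    rw [h0] at this
    rw [this]
    unfold pvSeg
    rw [show List.range (armC grid n m i j) = 0 :: List.range' 1 (armC grid n m i j - 1) from by
        rw [List.range_eq_range', show armC grid n m i j = (armC grid n m i j - 1) + 1 from by omega,
          List.range'_succ]
        norm_num,
      List.map_cons]
    simp [cellsA_zero, List.append_assoc]
  · rw [if_neg hG]
    have hu : upLen grid i j = 0 := by rw [upLen_eq]; simp [hG]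
    have hc : armC grid n m i j = 0 := by unfold armC; omega
    rw [hc]
    simp [pvSeg]

theorem segA_eq (grid : List String) (n m i j : Nat) (hi : i < n) (hj : j < m)
    (pl : List (Int × PySem.Set (Int × Int))) :
    (PySem.List.pyRange 0
        (min (min (min (pvGet2d (pvUlBuild grid n m).1 i j) (pvGet2d (pvDrBuild grid n m).1 i j))
          (pvGet2d (pvUlBuild grid n m).2 i j)) (pvGet2d (pvDrBuild grid n m).2 i j))).foldl
      (fun pl k => pl ++ [(4*k+1, pvCellsA i j k)]) pl = pl ++ pvSeg i j (armC grid n m i j) := by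
  have hU := ((ulBuild_inv grid n m).2.2 i j hi hj).1
  have hL := ((ulBuild_inv grid n m).2.2 i j hi hj).2
  have hD := ((drBuild_inv grid n m).2.2 i j hi hj).1
  have hR := ((drBuild_inv grid n m).2.2 i j hi hj).2
  rw [if_pos (by omega : i < n ∨ (i = n ∧ j < 0))] at hU hL
  rw [if_pos (by omega : 0 < i ∨ (i = 0 ∧ 0 ≤ j))] at hD hR
  rw [hU, hL, hD, hR]
  rw [show (min (min (min ((upLen grid i j : Int)) ((downLen grid n i j : Int)))
      ((leftLen grid i j : Int))) ((rightLen grid m i j : Int))) = ((armC grid n m i j : Int)) from by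
    unfold armC; push_cast; rfl]
  rw [PySem.List.foldl_append_singleton_eq_map (fun k => ((4*k+1 : Int), pvCellsA i j k)),
    PySem.List.pyRange_zero_natCast, List.map_map]
  rfl

theorem pluses_eq (grid : List String) (n m : Nat) :
    pvPlusesA grid n m (pvUlBuild grid n m) (pvDrBuild grid n m) = pvPlusesB grid n m := by
  unfold pvPlusesA pvPlusesB
  apply PySem.List.foldl_congr_mem
  intro pl i hi
  apply PySem.List.foldl_congr_mem
  intro pl' j hj
  rw [List.mem_range] at hi hj
  rw [segA_eq grid n m i j hi hj pl', segB_eq grid n m i j hi hj pl']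

theorem maxProd_eq : pvMaxProdA = pvMaxProdB := rfl

-- ===== VERDICT (by name: the statement is the Claim_ definition above) =====
theorem twoPluses_spec : Claim_equal_twoPluses := by
  intro grid _ _
  unfold Spec_twoPluses twoPluses twoPluses_alt
  simp only [pluses_eq, maxProd_eq]
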